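-- pv_equiv track=rewrite | github.com/FabianWe/pyjoust | pyjoust/group.py | group_sizes
-- ===== SOURCE A (Python) =====
-- def group_sizes(group_size, num_participants, additional_group=True):
--     """An iterator that yields for each group that should exist in the result the size of that group.
--
--     This makes it easier to divide a list of participants in the groups, as done by groups_by_size and groups_by_number.
--     Note that not all groups must be of the same size, especially not each group must be of size group_size.
--     As an example consider 7 groups 1, 2, ..., 7. If we wish to create groups of size 2 we would get the following
--     distribution (if additional group is true): [(1, 2), (3, 4), (5, 6), (7,)]. If additional_group is False
--     no additional group for the remaining team is created, thus the distribution is [(1, 2, 3), (4, 5), (6, 7)].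
--     This iterator returns the size of those entries in the list. For the first distribution it would yield
--     2, 2, 2, 1 and for the second distribution 3, 2, 2.
--
--     Args:
--         group_size: The size each group should have.
--         num_participants: The total number of participants (teams).
--         additional_group: True if an additional group should be created for remaining teams.
--
--     Yields:
--         For each group that should be created the number of teams in that group.
--     """
--     if group_size <= 0:
--         return
--     # additional logic, not just calling get_group_num
--     num_groups = num_participants // group_size
--     rest = num_participants % group_size
--     for i in range(num_groups):
--         if additional_group:
--             yield group_size
--         else:
--             if rest and i <= rest:
--                 yield group_size + 1
--             else:
--                 yield group_size
--     if additional_group and rest: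
--         yield rest
-- ===== SOURCE B (Python) =====
-- def group_sizes(group_size, num_participants, additional_group=True):
--     if group_size <= 0:
--         return
--     num_groups, rest = divmod(num_participants, group_size)
--     if additional_group:
--         yield from [group_size] * num_groups
--         if rest:
--             yield rest
--     elif num_groups > 0:
--         # spread all participants evenly over the num_groups groups
--         base, extra = divmod(num_participants, num_groups)
--         yield from [base + 1] * extra
--         yield from [base] * (num_groups - extra)
-- ===== Notes on version B (the rewrite author's own statement) =====
-- stated objective: simpler
-- what changed: For additional_group=False B drops the per-index branch entirely and applies a second divmod, spreading all participants evenly over the num_groups groups; the True branch is divmod plus replication.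
-- intended difference: With additional_group=False and a nonzero remainder r != num_groups, A's 'i <= rest' off-by-one yields min(num_groups, r+1) oversized groups so the sizes do not sum to num_participants (A gives [3,3,2] for 7 participants in groups of 2, contradicting its own docstring's [3,2,2]); B divides the participants evenly, which is the documented intent. — e.g. on group_sizes(2, 7, false): A returns [3, 3, 2], B returns [3, 2, 2]
import Mathlib
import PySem

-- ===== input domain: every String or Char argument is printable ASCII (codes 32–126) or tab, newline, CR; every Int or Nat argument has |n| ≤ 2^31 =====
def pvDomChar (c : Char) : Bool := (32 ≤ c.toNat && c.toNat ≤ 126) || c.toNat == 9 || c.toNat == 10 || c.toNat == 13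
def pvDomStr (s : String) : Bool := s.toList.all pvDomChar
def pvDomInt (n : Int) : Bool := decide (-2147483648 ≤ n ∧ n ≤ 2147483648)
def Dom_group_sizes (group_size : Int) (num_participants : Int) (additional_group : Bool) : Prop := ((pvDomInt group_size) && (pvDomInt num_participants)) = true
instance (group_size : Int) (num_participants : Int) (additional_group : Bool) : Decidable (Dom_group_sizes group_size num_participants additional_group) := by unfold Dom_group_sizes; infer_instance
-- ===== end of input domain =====

-- B replaces A's per-index loop by divmod plus uniform replication; in the additional_group=False
-- case it spreads the participants evenly over the groups with a second divmod (simpler), which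
-- fixes A's 'i <= rest' off-by-one stated as the intended difference D_ below.

-- ===== PORT A =====
def group_sizes (group_size : Int) (num_participants : Int) (additional_group : Bool) : List Int :=
  if group_size ≤ 0 then []
  else
    let num_groups := PySem.Int.floordiv num_participants group_size
    let rest := PySem.Int.mod num_participants group_size
    let body := (PySem.List.pyRange 0 num_groups 1).foldl
      (fun acc i =>
        if additional_group then acc ++ [group_size]
        else if rest ≠ 0 ∧ i ≤ rest then acc ++ [group_size + 1] else acc ++ [group_size]) []
    if additional_group = true ∧ rest ≠ 0 then body ++ [rest] else body

-- ===== PORT B =====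
def group_sizes_alt (group_size : Int) (num_participants : Int) (additional_group : Bool) : List Int :=
  if group_size ≤ 0 then []
  else
    let num_groups := PySem.Int.floordiv num_participants group_size
    let rest := PySem.Int.mod num_participants group_size
    if additional_group then
      List.replicate num_groups.toNat group_size ++ (if rest ≠ 0 then [rest] else [])
    else if 0 < num_groups then
      let base := PySem.Int.floordiv num_participants num_groups
      let extra := PySem.Int.mod num_participants num_groups
      List.replicate extra.toNat (base + 1) ++ List.replicate (num_groups - extra).toNat base
    else []

-- ===== PRECONDITION & SPEC =====
-- With additional_group=False and remainder r ∉ {0, num_groups}, A's 'i <= rest' off-by-one yields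
-- min(num_groups, r+1) oversized groups so the sizes do not sum to num_participants; B divides the
-- participants evenly over the groups, which is what A's own docstring shows ([3,2,2] for g=2, n=7).
def D_group_sizes (group_size : Int) (num_participants : Int) (additional_group : Bool) : Prop :=
  additional_group = false ∧ 0 < group_size ∧
  0 < PySem.Int.floordiv num_participants group_size ∧
  PySem.Int.mod num_participants group_size ≠ 0 ∧
  PySem.Int.mod num_participants group_size ≠ PySem.Int.floordiv num_participants group_size
instance (group_size : Int) (num_participants : Int) (additional_group : Bool) : Decidable (D_group_sizes group_size num_participants additional_group) := by unfold D_group_sizes; infer_instance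

def Spec_group_sizes (group_size : Int) (num_participants : Int) (additional_group : Bool) (out : List Int) : Prop := ¬ D_group_sizes group_size num_participants additional_group → out = group_sizes_alt group_size num_participants additional_group
instance (group_size : Int) (num_participants : Int) (additional_group : Bool) (out : List Int) : Decidable (Spec_group_sizes group_size num_participants additional_group out) := by unfold Spec_group_sizes; infer_instance

def pvDiffWitness_group_sizes : Int × Int × Bool := (2, 7, false)
def pvDiffWitnessOut_group_sizes : (List Int) × (List Int) := ([3, 3, 2], [3, 2, 2])

-- ===== CLAIM (what is proved, stated in full; the proofs are below) =====
def Claim_unchanged_group_sizes : Prop := ∀ (group_size : Int) (num_participants : Int) (additional_group : Bool), Dom_group_sizes group_size num_participants additional_group → Spec_group_sizes group_size num_participants additional_group (group_sizes group_size num_participants additional_group)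
def Claim_changed_group_sizes : Prop := Dom_group_sizes (pvDiffWitness_group_sizes.1) (pvDiffWitness_group_sizes.2.1) (pvDiffWitness_group_sizes.2.2) ∧ D_group_sizes (pvDiffWitness_group_sizes.1) (pvDiffWitness_group_sizes.2.1) (pvDiffWitness_group_sizes.2.2) ∧ group_sizes (pvDiffWitness_group_sizes.1) (pvDiffWitness_group_sizes.2.1) (pvDiffWitness_group_sizes.2.2) = pvDiffWitnessOut_group_sizes.1 ∧ group_sizes_alt (pvDiffWitness_group_sizes.1) (pvDiffWitness_group_sizes.2.1) (pvDiffWitness_group_sizes.2.2) = pvDiffWitnessOut_group_sizes.2 ∧ pvDiffWitnessOut_group_sizes.1 ≠ pvDiffWitnessOut_group_sizes.2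
def Claim_exact_group_sizes : Prop := ∀ (group_size : Int) (num_participants : Int) (additional_group : Bool), Dom_group_sizes group_size num_participants additional_group → D_group_sizes group_size num_participants additional_group → group_sizes group_size num_participants additional_group ≠ group_sizes_alt group_size num_participants additional_group

-- ===== LEMMAS AND PROOFS =====

lemma map_const_pyRange (a b v : Int) :
    (PySem.List.pyRange a b 1).map (fun _ => v) = List.replicate (b - a).toNat v := by
  rw [List.map_const']
  simp [PySem.List.length_pyRange_one]

lemma foldl_body_eq_map (xs : List Int) (init : List Int)
    (p : Int → Prop) [DecidablePred p] (u v : Int) :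
    xs.foldl (fun acc i => if p i then acc ++ [u] else acc ++ [v]) init
      = init ++ xs.map (fun i => if p i then u else v) := by
  have h : (fun (acc : List Int) (i : Int) => if p i then acc ++ [u] else acc ++ [v])
      = fun acc i => acc ++ [if p i then u else v] := by
    funext acc i; split_ifs <;> rfl
  rw [h, PySem.List.foldl_append_singleton_eq_map]

-- characterisation of A's output in the additional_group = false case (g > 0)
lemma groupSizesA_false_char (g n : Int) (hg : 0 < g) :
    group_sizes g n false
      = (let ng := PySem.Int.floordiv n g
         let r := PySem.Int.mod n g
         let c := if r = 0 then 0 else min ng (r + 1)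
         List.replicate c.toNat (g + 1) ++ List.replicate (ng - c).toNat g) := by
  unfold group_sizes
  simp only [if_neg (by omega : ¬ g ≤ 0)]
  set ng := PySem.Int.floordiv n g with hng
  set r := PySem.Int.mod n g with hr
  have hr0 : 0 ≤ r := PySem.Int.mod_nonneg n hg
  simp only [Bool.false_eq_true, if_false, false_and]
  by_cases hrz : r = 0
  · simp only [hrz, ne_eq, not_true_eq_false, false_and, if_true]
    rw [foldl_body_eq_map]
    have h2 : (PySem.List.pyRange 0 ng 1).map (fun i => if False then g + 1 else g)
        = (PySem.List.pyRange 0 ng 1).map (fun _ => g) := by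
      apply List.map_congr_left; intro i _; simp
    rw [h2, map_const_pyRange 0 ng g]
    simp
  · simp only [if_neg hrz]
    set m := min ng (r + 1) with hm
    by_cases hngpos : 0 < ng
    · have hm0 : 0 ≤ m := by omega
      have hmle : m ≤ ng := by omega
      rw [PySem.List.pyRange_one_append 0 m ng hm0 hmle,
        List.foldl_append, foldl_body_eq_map, foldl_body_eq_map]
      have h1 : (PySem.List.pyRange 0 m 1).map
          (fun i => if (r ≠ 0 ∧ i ≤ r) then g + 1 else g)
          = List.replicate m.toNat (g + 1) := by
        have heq : (PySem.List.pyRange 0 m 1).map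
            (fun i => if (r ≠ 0 ∧ i ≤ r) then g + 1 else g)
            = (PySem.List.pyRange 0 m 1).map (fun _ => g + 1) := by
          apply List.map_congr_left; intro i hi
          rw [PySem.List.mem_pyRange_one] at hi
          have : i ≤ r := by omega
          simp [hrz, this]
        rw [heq]; simpa using map_const_pyRange 0 m (g + 1)
      have h2 : (PySem.List.pyRange m ng 1).map
          (fun i => if (r ≠ 0 ∧ i ≤ r) then g + 1 else g)
          = List.replicate (ng - m).toNat g := by
        have heq : (PySem.List.pyRange m ng 1).map
            (fun i => if (r ≠ 0 ∧ i ≤ r) then g + 1 else g)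
            = (PySem.List.pyRange m ng 1).map (fun _ => g) := by
          apply List.map_congr_left; intro i hi
          rw [PySem.List.mem_pyRange_one] at hi
          have : ¬ i ≤ r := by omega
          simp [this]
        rw [heq]; exact map_const_pyRange m ng g
      rw [h1, h2]; simp
    · have hnil : PySem.List.pyRange 0 ng 1 = [] :=
        PySem.List.pyRange_one_eq_nil (by omega)
      have hmle : m ≤ 0 := by omega
      rw [hnil]
      simp [Int.toNat_of_nonpos hmle, Int.toNat_of_nonpos (by omega : ng - m ≤ 0)]

-- exact division: floordiv/mod of q*b by b (0 < b)
lemma floordiv_mul_self (q b : Int) (hb : 0 < b) :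
    PySem.Int.floordiv (q * b) b = q ∧ PySem.Int.mod (q * b) b = 0 := by
  have h1 : PySem.Int.floordiv (q * b) b = q := by
    rw [PySem.Int.floordiv_eq_iff_of_pos hb]
    constructor <;> nlinarith
  have h2 := PySem.Int.floordiv_mul_add_mod (q * b) b
  rw [h1] at h2
  exact ⟨h1, by omega⟩

-- ===== VERDICT (by name: the statement is the Claim_ definition above) =====
theorem group_sizes_spec : Claim_unchanged_group_sizes := by
  intro g n add _ hnd
  by_cases hg : g ≤ 0
  · unfold group_sizes group_sizes_alt; simp [hg]
  · have hgpos : 0 < g := by omega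
    set ng := PySem.Int.floordiv n g with hng
    set r := PySem.Int.mod n g with hr
    have hr0 : 0 ≤ r := PySem.Int.mod_nonneg n hgpos
    have hdiv := PySem.Int.floordiv_mul_add_mod n g
    cases add with
    | true =>
      unfold group_sizes group_sizes_alt
      simp only [if_neg hg, ← hng, ← hr, true_and, if_true]
      rw [PySem.List.foldl_append_singleton_eq_map (f := fun _ => g) (acc := [])] at *
      · by_cases hrz : r = 0
        · simp [hrz, map_const_pyRange 0 ng g]
        · simp [hrz, map_const_pyRange 0 ng g]
    | false =>
      unfold D_group_sizes at hnd
      rw [groupSizesA_false_char g n hgpos]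
      unfold group_sizes_alt
      simp only [if_neg hg, ← hng, ← hr, Bool.false_eq_true, if_false]
      by_cases hrz : r = 0
      · -- exact division: both sides are replicate ng g (or [] when ng ≤ 0)
        rw [if_pos hrz]
        by_cases hngpos : 0 < ng
        · have hn : n = ng * g := by
            have h := PySem.Int.floordiv_mul_add_mod n g
            rw [← hng, ← hr] at h
            omega
          have hq := (floordiv_mul_self g ng hngpos).1
          have hm := (floordiv_mul_self g ng hngpos).2
          rw [mul_comm g ng] at hq hm
          rw [if_pos hngpos, hn, hq, hm]
        · rw [if_neg hngpos]
          simp [Int.toNat_of_nonpos (by omega : ng ≤ 0)]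
      · -- r ≠ 0; outside D_ forces ng ≤ 0 or r = ng
        rw [if_neg hrz]
        by_cases hngpos : 0 < ng
        · have hreq : r = ng := by
            by_contra hne
            exact hnd ⟨rfl, hgpos, by omega, by omega, by omega⟩
          have hn : n = ng * (g + 1) := by
            have h := PySem.Int.floordiv_mul_add_mod n g
            rw [← hng, ← hr] at h
            rw [mul_add, mul_one]
            omega
          have hq := (floordiv_mul_self (g + 1) ng hngpos).1
          have hm := (floordiv_mul_self (g + 1) ng hngpos).2
          rw [mul_comm (g + 1) ng] at hq hm
          rw [if_pos hngpos, hn, hq, hm]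
          have hmin : min ng (r + 1) = ng := by omega
          rw [hmin]
          simp
        · have hmle : min ng (r + 1) ≤ 0 := by omega
          rw [if_neg hngpos]
          simp [Int.toNat_of_nonpos hmle,
            Int.toNat_of_nonpos (by omega : ng - min ng (r + 1) ≤ 0)]

theorem group_sizes_changed : Claim_changed_group_sizes := by
  unfold Claim_changed_group_sizes; decide

theorem group_sizes_tight : Claim_exact_group_sizes := by
  intro g n add _ hd
  obtain ⟨hadd, hgpos, hngpos, hrz, hrne⟩ := hd
  subst hadd
  set ng := PySem.Int.floordiv n g with hng
  set r := PySem.Int.mod n g with hr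
  have hr0 : 0 ≤ r := PySem.Int.mod_nonneg n hgpos
  have hrb : r < g := PySem.Int.mod_lt n hgpos
  have hdiv := PySem.Int.floordiv_mul_add_mod n g
  -- sums: A's list sums to ng*g + min(ng, r+1), B's sums to n = ng*g + r; r ≠ min(ng, r+1)
  intro heq
  have hsum : (group_sizes g n false).sum = (group_sizes_alt g n false).sum := by rw [heq]
  set c := min ng (r + 1) with hc
  have hc0 : 0 ≤ c := by omega
  have hcle : c ≤ ng := by omega
  have hA : (group_sizes g n false).sum = c * (g + 1) + (ng - c) * g := by
    rw [groupSizesA_false_char g n hgpos]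
    simp only [← hng, ← hr, if_neg hrz, ← hc, List.sum_append, List.sum_replicate]
    rw [nsmul_eq_mul, nsmul_eq_mul, Int.toNat_of_nonneg hc0,
      Int.toNat_of_nonneg (by omega : (0:Int) ≤ ng - c)]
  set base := PySem.Int.floordiv n ng with hbase
  set extra := PySem.Int.mod n ng with hextra
  have hex0 : 0 ≤ extra := PySem.Int.mod_nonneg n hngpos
  have hexb : extra < ng := PySem.Int.mod_lt n hngpos
  have hdiv2 := PySem.Int.floordiv_mul_add_mod n ng
  have hB : (group_sizes_alt g n false).sum = n := by
    unfold group_sizes_alt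
    simp only [if_neg (by omega : ¬ g ≤ 0), ← hng, ← hr, Bool.false_eq_true, if_false,
      if_pos hngpos, ← hbase, ← hextra, List.sum_append, List.sum_replicate]
    rw [nsmul_eq_mul, nsmul_eq_mul, Int.toNat_of_nonneg hex0,
      Int.toNat_of_nonneg (by omega : (0:Int) ≤ ng - extra)]
    nlinarith [hdiv2]
  rw [hA, hB] at hsum
  -- hsum : c*(g+1) + (ng-c)*g = n = ng*g + r  ⇒  c = r, contradicting c = min(ng, r+1) ≠ r
  have : c = r := by nlinarith [hsum, hdiv]
  omega
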